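-- pv_equiv track=rewrite | github.com/JamesABaker/Tip-Top-Table | scripts/graphs.py | impossible_cordinates
-- ===== SOURCE A (Python) =====
-- def impossible_subs():
--     aa_impossible_subs_dict = {
--         "A": ["K", "R", "Q", "H", "N", "Y", "W", "C", "M", "F", "I", "L"],
--         "R": ["E", "D", "N", "Y", "V", "F", "A"],
--         "N": ["R", "E", "Q", "P", "W", "C", "M", "G", "V", "F", "A", "L"],
--         "D": ["K", "R", "Q", "P", "W", "C", "M", "T", "S", "F", "I", "L"],
--         "C": ["K", "E", "D", "Q", "H", "N", "P", "M", "T", "V", "A", "I", "L"],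
--         "Q": ["D", "N", "Y", "W", "C", "M", "T", "S", "G", "V", "F", "A", "I"],
--         "E": ["R", "H", "N", "P", "Y", "W", "C", "M", "T", "S", "F", "I", "L"],
--         "G": ["K", "Q", "H", "N", "P", "Y", "M", "T", "F", "I", "L"],
--         "H": ["K", "E", "W", "C", "M", "T", "S", "G", "V", "F", "A", "I"],
--         "I": ["E", "D", "Q", "H", "P", "Y", "W", "C", "G", "A"],
--         "L": ["K", "E", "D", "N", "Y", "C", "T", "G", "A"],
--         "K": ["D", "H", "P", "Y", "W", "C", "S", "G", "V", "F", "A", "L"],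
--         "M": ["E", "D", "Q", "H", "N", "P", "Y", "W", "C", "S", "G", "F", "A"],
--         "F": ["K", "R", "E", "D", "Q", "H", "N", "P", "W", "M", "T", "G", "A"],
--         "P": ["K", "E", "D", "N", "Y", "W", "C", "M", "G", "V", "F", "I"],
--         "S": ["K", "E", "D", "Q", "H", "M", "V"],
--         "T": ["E", "D", "Q", "H", "Y", "W", "C", "G", "V", "F", "L"],
--         "W": ["K", "E", "D", "Q", "H", "N", "P", "Y", "M", "T", "V", "F", "A", "I"],
--         "Y": ["K", "R", "E", "Q", "P", "W", "M", "T", "G", "V", "A", "I", "L"],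
--         "V": ["K", "R", "Q", "H", "N", "P", "Y", "W", "C", "T", "S"],
--         "U": [],
--     }
--
--     return aa_impossible_subs_dict
--
-- def impossible_cordinates(aa_order):
--
--     impossible_substitutions = impossible_subs()
--     impossible_aa = []
--     impossible_x_coordinates = []
--     impossible_y_coorindates = []
--     for x_coordinate, x_amino_acid in enumerate(aa_order):
--         for y_coordinate, y_amino_acid in enumerate(aa_order):
--             if y_amino_acid in impossible_substitutions[x_amino_acid]:
--                 impossible_x_coordinates.append(x_coordinate)
--                 impossible_y_coorindates.append(y_coordinate)
--     return (impossible_x_coordinates, impossible_y_coorindates)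
-- ===== SOURCE B (Python) =====
-- def impossible_cordinates(aa_order):
--     # forbidden substitutions as strings of single-letter codes (same pairs as the
--     # original dict-of-lists table, a more compact representation)
--     subs = {
--         "A": "KRQHNYWCMFIL",
--         "R": "EDNYVFA",
--         "N": "REQPWCMGVFAL",
--         "D": "KRQPWCMTSFIL",
--         "C": "KEDQHNPMTVAIL",
--         "Q": "DNYWCMTSGVFAI",
--         "E": "RHNPYWCMTSFIL",
--         "G": "KQHNPYMTFIL",
--         "H": "KEWCMTSGVFAI",
--         "I": "EDQHPYWCGA",
--         "L": "KEDNYCTGA",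
--         "K": "DHPYWCSGVFAL",
--         "M": "EDQHNPYWCSGFA",
--         "F": "KREDQHNPWMTGA",
--         "P": "KEDNYWCMGVFI",
--         "S": "KEDQHMV",
--         "T": "EDQHYWCGVFL",
--         "W": "KEDQHNPYMTVFAI",
--         "Y": "KREQPWMTGVAIL",
--         "V": "KRQHNPYWCTS",
--         "U": "",
--     }
--     # position index: amino acid -> ascending list of positions in aa_order
--     index = {}
--     for i, aa in enumerate(aa_order):
--         index.setdefault(aa, []).append(i)
--     xs = []
--     ys = []
--     for x, aa in enumerate(aa_order):
--         hits = sorted(p for ch in subs[aa] for p in index.get(ch, []))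
--         xs += [x] * len(hits)
--         ys += hits
--     return (xs, ys)
-- ===== Notes on version B (the rewrite author's own statement) =====
-- stated objective: faster
-- what changed: Instead of scanning all n^2 (x,y) pairs and testing each against a dict-of-lists table, B stores the table as strings of single-letter codes, builds a position index (amino acid -> ascending positions) in one pass, and per x gathers and sorts the positions of the forbidden letters from the index.
import Mathlib
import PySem

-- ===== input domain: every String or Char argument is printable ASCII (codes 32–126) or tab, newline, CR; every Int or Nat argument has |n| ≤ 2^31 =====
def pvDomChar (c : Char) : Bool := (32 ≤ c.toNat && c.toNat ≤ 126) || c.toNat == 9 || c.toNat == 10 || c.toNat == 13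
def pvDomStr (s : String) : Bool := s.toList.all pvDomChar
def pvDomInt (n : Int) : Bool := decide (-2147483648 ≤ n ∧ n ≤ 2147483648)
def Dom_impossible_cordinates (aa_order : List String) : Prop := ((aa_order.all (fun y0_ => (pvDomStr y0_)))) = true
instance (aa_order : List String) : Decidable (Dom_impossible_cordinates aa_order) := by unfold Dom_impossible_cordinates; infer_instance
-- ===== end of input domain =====

-- B replaces A's quadratic pair scan (membership test per (x,y) pair) by a compact
-- string-coded table and a prebuilt position index consulted once per x position.

-- ===== PORT A =====
-- the literal substitution table of A (impossible_subs(): dict of lists)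
def pvSubsA : PySem.Dict String (List String) := PySem.Dict.ofList [("A", ["K", "R", "Q", "H", "N", "Y", "W", "C", "M", "F", "I", "L"]), ("R", ["E", "D", "N", "Y", "V", "F", "A"]), ("N", ["R", "E", "Q", "P", "W", "C", "M", "G", "V", "F", "A", "L"]), ("D", ["K", "R", "Q", "P", "W", "C", "M", "T", "S", "F", "I", "L"]), ("C", ["K", "E", "D", "Q", "H", "N", "P", "M", "T", "V", "A", "I", "L"]), ("Q", ["D", "N", "Y", "W", "C", "M", "T", "S", "G", "V", "F", "A", "I"]), ("E", ["R", "H", "N", "P", "Y", "W", "C", "M", "T", "S", "F", "I", "L"]), ("G", ["K", "Q", "H", "N", "P", "Y", "M", "T", "F", "I", "L"]), ("H", ["K", "E", "W", "C", "M", "T", "S", "G", "V", "F", "A", "I"]), ("I", ["E", "D", "Q", "H", "P", "Y", "W", "C", "G", "A"]), ("L", ["K", "E", "D", "N", "Y", "C", "T", "G", "A"]), ("K", ["D", "H", "P", "Y", "W", "C", "S", "G", "V", "F", "A", "L"]), ("M", ["E", "D", "Q", "H", "N", "P", "Y", "W", "C", "S", "G", "F", "A"]), ("F", ["K", "R", "E",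 "D", "Q", "H", "N", "P", "W", "M", "T", "G", "A"]), ("P", ["K", "E", "D", "N", "Y", "W", "C", "M", "G", "V", "F", "I"]), ("S", ["K", "E", "D", "Q", "H", "M", "V"]), ("T", ["E", "D", "Q", "H", "Y", "W", "C", "G", "V", "F", "L"]), ("W", ["K", "E", "D", "Q", "H", "N", "P", "Y", "M", "T", "V", "F", "A", "I"]), ("Y", ["K", "R", "E", "Q", "P", "W", "M", "T", "G", "V", "A", "I", "L"]), ("V", ["K", "R", "Q", "H", "N", "P", "Y", "W", "C", "T", "S"]), ("U", [])]

def impossible_cordinates (aa_order : List String) : List Int × List Int :=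
  let impossible_substitutions := pvSubsA
  (PySem.List.enumerate aa_order).foldl (fun acc x =>
      (PySem.List.enumerate aa_order).foldl (fun acc2 y =>
          -- impossible_substitutions[x_amino_acid]: KeyError on a missing key; Pre_ excludes that
          if ((impossible_substitutions.get? x.2).getD []).contains y.2 then
            (acc2.1 ++ [x.1], acc2.2 ++ [y.1])
          else acc2)
        acc)
    (([] : List Int), ([] : List Int))

-- ===== PORT B =====
-- B's table: forbidden substitutions as strings of single-letter codes
def pvSubsB : PySem.Dict String String := PySem.Dict.ofList [("A", "KRQHNYWCMFIL"), ("R", "EDNYVFA"), ("N", "REQPWCMGVFAL"), ("D", "KRQPWCMTSFIL"), ("C", "KEDQHNPMTVAIL"), ("Q", "DNYWCMTSGVFAI"), ("E", "RHNPYWCMTSFIL"), ("G", "KQHNPYMTFIL"), ("H", "KEWCMTSGVFAI"), ("I", "EDQHPYWCGA"), ("L", "KEDNYCTGA"), ("K", "DHPYWCSGVFAL"), ("M", "EDQHNPYWCSGFA"), ("F", "KREDQHNPWMTGA"), ("P", "KEDNYWCMGVFI"), ("S", "KEDQHMV"), ("T", "EDQHYWCGVFL"), ("W", "KEDQHNPYMTVFAI"),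 ("Y", "KREQPWMTGVAIL"), ("V", "KRQHNPYWCTS"), ("U", "")]

-- for i, aa in enumerate(aa_order): index.setdefault(aa, []).append(i)
def pvIndexB : List String → Int → PySem.Dict String (List Int) → PySem.Dict String (List Int)
  | [], _, d => d
  | aa :: rest, i, d => pvIndexB rest (i + 1) (d.modify aa [] (· ++ [i]))

-- sorted(p for ch in subs[aa] for p in index.get(ch, []))
def pvRowB (idx : PySem.Dict String (List Int)) (forb : String) : List Int :=
  PySem.List.sorted (forb.toList.foldl (fun l c => l ++ idx.getD (String.ofList [c]) []) []) (fun v => v) false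

-- for x, aa in enumerate(aa_order): xs += [x]*len(hits); ys += hits
def pvScanB (idx : PySem.Dict String (List Int)) : List String → Int → List Int × List Int
  | [], _ => ([], [])
  | aa :: rest, x =>
      let hits := pvRowB idx ((pvSubsB.get? aa).getD "")   -- subs[aa]: KeyError excluded by Pre_
      let tail := pvScanB idx rest (x + 1)
      (List.replicate hits.length x ++ tail.1, hits ++ tail.2)

def impossible_cordinates_alt (aa_order : List String) : List Int × List Int :=
  pvScanB (pvIndexB aa_order 0 PySem.Dict.empty) aa_order 0

-- ===== PRECONDITION & SPEC =====
-- Pre_ excludes exactly the inputs containing a string that is not a key of the table: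
-- there the Python A raises KeyError (impossible_substitutions[x_amino_acid]).
def Pre_impossible_cordinates (aa_order : List String) : Prop :=
  (aa_order.all (fun s => s ∈ ["A", "R", "N", "D", "C", "Q", "E", "G", "H", "I", "L", "K", "M", "F", "P", "S", "T", "W", "Y", "V", "U"])) = true
instance (aa_order : List String) : Decidable (Pre_impossible_cordinates aa_order) := by
  unfold Pre_impossible_cordinates; infer_instance
def pvWitness_impossible_cordinates : List String := ["A", "G", "U", "A"]
def Spec_impossible_cordinates (aa_order : List String) (out : List Int × List Int) : Prop := out = impossible_cordinates_alt aa_order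
instance (aa_order : List String) (out : List Int × List Int) : Decidable (Spec_impossible_cordinates aa_order out) := by unfold Spec_impossible_cordinates; infer_instance

-- ===== CLAIM (what is proved, stated in full; the proofs are below) =====
def Claim_equal_impossible_cordinates : Prop := ∀ (aa_order : List String), Dom_impossible_cordinates aa_order → Pre_impossible_cordinates aa_order → Spec_impossible_cordinates aa_order (impossible_cordinates aa_order)

-- ===== LEMMAS AND PROOFS =====

-- A's inner loop over the enumerated list, as an append of the filtered pairs
theorem pv_innerA (l : List (Int × String)) (F : List String) (x : Int) (acc : List Int × List Int) :
    l.foldl (fun a y => if F.contains y.2 then (a.1 ++ [x], a.2 ++ [y.1]) else a) acc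
      = (acc.1 ++ List.replicate (l.filter (fun p => F.contains p.2)).length x,
         acc.2 ++ (l.filter (fun p => F.contains p.2)).map (·.1)) := by
  induction l generalizing acc with
  | nil => simp
  | cons p t ih =>
    rw [List.foldl_cons, ih]
    by_cases hp : p.2 ∈ F
    · simp [hp, List.replicate_succ]
    · simp [hp]

-- a fold appending to both components, as a pair of flatMaps
theorem pv_pairfold {α : Type} (l : List α) (f g : α → List Int) (acc : List Int × List Int) :
    l.foldl (fun a p => (a.1 ++ f p, a.2 ++ g p)) acc
      = (acc.1 ++ l.flatMap f, acc.2 ++ l.flatMap g) := by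
  induction l generalizing acc with
  | nil => simp
  | cons p t ih => rw [List.foldl_cons, ih]; simp

-- B's recursive index builder is the fold over the enumerated list
theorem pv_indexB_eq (aas : List String) (i : Int) (d : PySem.Dict String (List Int)) :
    pvIndexB aas i d
      = (PySem.List.enumerate aas i).foldl (fun d q => d.modify q.2 [] (· ++ [q.1])) d := by
  induction aas generalizing i d with
  | nil => simp [pvIndexB, PySem.List.enumerate_nil]
  | cons aa t ih => rw [PySem.List.enumerate_cons]; simp [pvIndexB, ih]

-- the index built by B: positions of f, in order
theorem pv_index (l : List (Int × String)) (f : String) :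
    ((l.foldl (fun d q => d.modify q.2 [] (· ++ [q.1])) PySem.Dict.empty).getD f [])
      = (l.filter (fun p => p.2 == f)).map (·.1) := by
  have h := PySem.Dict.getD_foldl_modify_append (l := l.map (fun q => (q.2, q.1)))
      (d := (PySem.Dict.empty : PySem.Dict String (List Int))) (c := f)
  rw [List.foldl_map] at h
  simpa [List.filter_map, Function.comp, List.map_map] using h

-- B's recursive scan, as a pair of flatMaps over the enumerated list
theorem pv_scanB_eq (idx : PySem.Dict String (List Int)) (aas : List String) (x : Int) :
    pvScanB idx aas x
      = ((PySem.List.enumerate aas x).flatMap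
           (fun p => List.replicate (pvRowB idx ((pvSubsB.get? p.2).getD "")).length p.1),
         (PySem.List.enumerate aas x).flatMap
           (fun p => pvRowB idx ((pvSubsB.get? p.2).getD ""))) := by
  induction aas generalizing x with
  | nil => simp [pvScanB, PySem.List.enumerate_nil]
  | cons aa t ih => rw [PySem.List.enumerate_cons]; simp [pvScanB, ih]

-- splitting the filter over the head of the forbidden list
theorem pv_filter_split (f : String) (t : List String) (hft : f ∉ t) (l : List (Int × String)) :
    (l.filter (fun p => (f :: t).contains p.2)).Perm
      (l.filter (fun p => p.2 == f) ++ l.filter (fun p => t.contains p.2)) := by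
  induction l with
  | nil => simp
  | cons p r ihl =>
    by_cases h1 : p.2 = f
    · have h2 : p.2 ∉ t := h1 ▸ hft
      simpa [h1, h2, hft] using ihl.cons p
    · by_cases h2 : p.2 ∈ t
      · simp only [List.filter_cons]
        have hc : ((f :: t).contains p.2) = true := by simp [h2]
        simpa [hc, h1, h2] using (ihl.cons p).trans List.perm_middle.symm
      · have hc : ((f :: t).contains p.2) = false := by simp [h1, h2]
        simp only [List.filter_cons]
        simpa [hc, h1, h2] using ihl

-- gathering the positions forbidden amino acid by forbidden amino acid is a permutation
-- of the single filtered pass, provided the forbidden list has no duplicates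
theorem pv_perm (F : List String) (l : List (Int × String)) (hF : F.Nodup) :
    (F.flatMap (fun f => l.filter (fun p => p.2 == f))).Perm
      (l.filter (fun p => F.contains p.2)) := by
  induction F with
  | nil => simp
  | cons f t ih =>
    have hft : f ∉ t := (List.nodup_cons.mp hF).1
    have ih' := ih (List.nodup_cons.mp hF).2
    rw [List.flatMap_cons]
    exact (ih'.append_left (l.filter (fun p => p.2 == f))).trans (pv_filter_split f t hft l).symm

-- B's string row spells out A's list row, letter for letter, for every table key
theorem pv_tables_agree : ∀ s ∈ ["A", "R", "N", "D", "C", "Q", "E", "G", "H", "I", "L", "K", "M", "F", "P", "S", "T", "W", "Y", "V", "U"],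
    ((pvSubsB.get? s).getD "").toList.map (fun c => String.ofList [c]) = (pvSubsA.get? s).getD [] := by decide

-- every forbidden list in A's table is duplicate-free
theorem pv_subs_nodup : ∀ s ∈ ["A", "R", "N", "D", "C", "Q", "E", "G", "H", "I", "L", "K", "M", "F", "P", "S", "T", "W", "Y", "V", "U"],
    ((pvSubsA.get? s).getD []).Nodup := by decide

-- the per-x y-list B computes equals A's filtered scan
theorem pv_row_eq (aa_order : List String) (s : String)
    (hs : s ∈ ["A", "R", "N", "D", "C", "Q", "E", "G", "H", "I", "L", "K", "M", "F", "P", "S", "T", "W", "Y", "V", "U"]) :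
    pvRowB (pvIndexB aa_order 0 PySem.Dict.empty) ((pvSubsB.get? s).getD "")
      = ((PySem.List.enumerate aa_order).filter
          (fun p => ((pvSubsA.get? s).getD []).contains p.2)).map (·.1) := by
  set F := (pvSubsA.get? s).getD [] with hFdef
  set e := PySem.List.enumerate aa_order with he
  unfold pvRowB
  rw [pv_indexB_eq]
  have hmapfold : ((pvSubsB.get? s).getD "").toList.foldl
      (fun l c => l ++ ((e.foldl (fun d q => d.modify q.2 [] (· ++ [q.1])) PySem.Dict.empty).getD (String.ofList [c]) [])) []
      = F.foldl (fun l f => l ++ ((e.foldl (fun d q => d.modify q.2 [] (· ++ [q.1])) PySem.Dict.empty).getD f [])) [] := by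
    rw [hFdef, ← pv_tables_agree s hs, List.foldl_map]
  rw [hmapfold, PySem.List.foldl_append_eq_flatMap]
  have hfold : F.flatMap (fun f => ((e.foldl (fun d q => d.modify q.2 [] (· ++ [q.1])) PySem.Dict.empty)).getD f [])
      = F.flatMap (fun f => (e.filter (fun p => p.2 == f)).map (·.1)) := by
    refine List.flatMap_congr ?_
    intro f _
    exact pv_index e f
  rw [List.nil_append, hfold]
  have hperm : ((e.filter (fun p => F.contains p.2)).map (·.1)).Perm
      (F.flatMap (fun f => (e.filter (fun p => p.2 == f)).map (·.1))) := by
    have := (pv_perm F e (pv_subs_nodup s hs)).map (·.1)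
    simpa [List.map_flatMap] using this.symm
  have hpw : ((e.filter (fun p => F.contains p.2)).map (·.1)).Pairwise (· < ·) := by
    have h1 : e.Pairwise (fun p q => p.1 < q.1) := PySem.List.pairwise_lt_enumerate aa_order 0
    exact (h1.filter _).map _ (fun a b h => h)
  exact PySem.List.sorted_eq_of_perm_of_pairwise_lt _ _ _ hperm hpw

-- ===== VERDICT (by name: the statement is the Claim_ definition above) =====
theorem impossible_cordinates_spec : Claim_equal_impossible_cordinates := by
  intro aa_order _ hpre
  unfold Spec_impossible_cordinates impossible_cordinates impossible_cordinates_alt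
  have hkey : ∀ p ∈ PySem.List.enumerate aa_order,
      p.2 ∈ ["A", "R", "N", "D", "C", "Q", "E", "G", "H", "I", "L", "K", "M", "F", "P", "S", "T", "W", "Y", "V", "U"] := by
    intro p hp
    rcases ((PySem.List.mem_enumerate_iff _ _ _).mp hp) with ⟨k, hk, rfl⟩
    unfold Pre_impossible_cordinates at hpre
    exact by simpa using (List.all_eq_true.mp hpre _ (by simp [List.getElem_mem hk]))
  have hA : (PySem.List.enumerate aa_order).foldl (fun acc x =>
      (PySem.List.enumerate aa_order).foldl (fun acc2 y =>
          if ((pvSubsA.get? x.2).getD []).contains y.2 then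
            (acc2.1 ++ [x.1], acc2.2 ++ [y.1])
          else acc2) acc) (([] : List Int), ([] : List Int))
      = (PySem.List.enumerate aa_order).foldl (fun acc x =>
          (acc.1 ++ List.replicate (pvRowB (pvIndexB aa_order 0 PySem.Dict.empty) ((pvSubsB.get? x.2).getD "")).length x.1,
           acc.2 ++ pvRowB (pvIndexB aa_order 0 PySem.Dict.empty) ((pvSubsB.get? x.2).getD ""))) (([] : List Int), ([] : List Int)) := by
    apply PySem.List.foldl_congr_mem
    intro acc p hp
    rw [pv_innerA, pv_row_eq aa_order p.2 (hkey p hp)]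
    simp
  rw [hA, pv_pairfold, pv_scanB_eq]
  simp
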